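-- pv_equiv track=rewrite | github.com/IDU-CVLab/NST_for_Gen | tools/utils.py | bin_lists_nearest_neighbor
-- ===== SOURCE A (Python) =====
-- def bin_lists_nearest_neighbor(lists_to_bin, best_bin_size):
--     last_bin_ids = []
--     cur_size = 0
--     prev_size = 0
--     data_list_id = -1
--
--     # Determine last list indexes on bins.
--     for data_list_id, data_list in enumerate(lists_to_bin):
--         cur_size += len(data_list)
--         if cur_size >= best_bin_size:
--             if best_bin_size - prev_size < cur_size - best_bin_size:
--                 last_bin_ids.append(data_list_id - 1)
--                 cur_size = len(data_list)
--                 prev_size = len(data_list)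
--             else:
--                 prev_size = cur_size
--         else:
--             prev_size = cur_size
--     last_bin_ids.append(data_list_id)
--
--     # Get all list indexes on bins.
--     bin_ids = []
--     cur_bin = []
--     for data_list_id, data_list in enumerate(lists_to_bin):
--         if data_list_id not in last_bin_ids:
--             cur_bin.append(data_list_id)
--         else:
--             cur_bin.append(data_list_id)
--             bin_ids.append(cur_bin.copy())
--             cur_bin = []
--
--     return bin_ids
-- ===== SOURCE B (Python) =====
-- def bin_lists_nearest_neighbor(lists_to_bin, best_bin_size):
--     # Single fused pass: grow the current bin and close it greedily when the
--     # previous cutoff was nearer to best_bin_size than the current one.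
--     bin_ids = []
--     cur_bin = []
--     cur_size = 0
--     prev_size = 0
--     for i, data_list in enumerate(lists_to_bin):
--         n = len(data_list)
--         new_size = cur_size + n
--         if new_size >= best_bin_size and best_bin_size - prev_size < new_size - best_bin_size and cur_bin:
--             bin_ids.append(cur_bin)
--             cur_bin = [i]
--             cur_size = n
--             prev_size = n
--         else:
--             cur_bin.append(i)
--             cur_size = new_size
--             prev_size = new_size
--     if cur_bin:
--         bin_ids.append(cur_bin)
--     return bin_ids
-- ===== Notes on version B (the rewrite author's own statement) =====
-- stated objective: simpler
-- what changed: Fuses A's two passes (boundary-index collection plus a second membership-test grouping loop) into one pass that grows the current bin directly and closes it when the nearest-neighbor condition fires, dropping the last_bin_ids list and the membership test.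
import Mathlib
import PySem

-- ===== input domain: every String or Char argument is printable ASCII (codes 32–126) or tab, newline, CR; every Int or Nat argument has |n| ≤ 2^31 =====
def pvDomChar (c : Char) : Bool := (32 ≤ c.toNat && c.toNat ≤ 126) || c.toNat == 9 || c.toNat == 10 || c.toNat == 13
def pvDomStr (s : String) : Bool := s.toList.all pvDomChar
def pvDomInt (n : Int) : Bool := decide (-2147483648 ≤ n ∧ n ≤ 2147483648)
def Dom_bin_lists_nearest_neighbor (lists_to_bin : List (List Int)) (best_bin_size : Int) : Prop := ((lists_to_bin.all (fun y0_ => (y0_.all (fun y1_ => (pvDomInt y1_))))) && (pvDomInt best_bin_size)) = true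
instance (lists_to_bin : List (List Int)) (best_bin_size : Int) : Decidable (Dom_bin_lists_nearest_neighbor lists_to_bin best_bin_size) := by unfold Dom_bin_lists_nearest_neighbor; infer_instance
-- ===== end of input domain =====

-- B fuses A's two passes into one pass that builds the bins directly (simpler; no last_bin_ids, no membership test); return values proved equal.

-- ===== PORT A =====
-- First loop of A: collects boundary indices `last` and the final data_list_id.
def pvLoopA1 (b : Int) (xs : List (List Int)) (k : Int) (last : List Int)
    (cur prev dlid : Int) : List Int × Int :=
  match xs with
  | [] => (last, dlid)
  | d :: rest =>
    let cur' := cur + (d.length : Int)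
    if cur' ≥ b then
      if b - prev < cur' - b then
        pvLoopA1 b rest (k + 1) (last ++ [k - 1]) (d.length : Int) (d.length : Int) k
      else pvLoopA1 b rest (k + 1) last cur' cur' k
    else pvLoopA1 b rest (k + 1) last cur' cur' k

-- Second loop of A: groups indices, closing a bin whenever the index is in `last`.
def pvLoopA2 (xs : List (List Int)) (k : Int) (last : List Int)
    (bins : List (List Int)) (cb : List Int) : List (List Int) :=
  match xs with
  | [] => bins
  | _ :: rest =>
    let cb' := cb ++ [k]
    if k ∈ last then pvLoopA2 rest (k + 1) last (bins ++ [cb']) []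
    else pvLoopA2 rest (k + 1) last bins cb'

def bin_lists_nearest_neighbor (lists_to_bin : List (List Int)) (best_bin_size : Int) : List (List Int) :=
  let s := pvLoopA1 best_bin_size lists_to_bin 0 [] 0 0 (-1)
  pvLoopA2 lists_to_bin 0 (s.1 ++ [s.2]) [] []

-- ===== PORT B =====
-- Single fused pass of B (Source B): grow cur_bin, close it when the condition fires.
def pvLoopB (b : Int) (xs : List (List Int)) (k : Int)
    (bins : List (List Int)) (cb : List Int) (cur prev : Int) : List (List Int) :=
  match xs with
  | [] => if cb = [] then bins else bins ++ [cb]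
  | d :: rest =>
    let n : Int := (d.length : Int)
    let new := cur + n
    if new ≥ b ∧ b - prev < new - b ∧ cb ≠ [] then
      pvLoopB b rest (k + 1) (bins ++ [cb]) [k] n n
    else
      pvLoopB b rest (k + 1) bins (cb ++ [k]) new new

def bin_lists_nearest_neighbor_alt (lists_to_bin : List (List Int)) (best_bin_size : Int) : List (List Int) :=
  pvLoopB best_bin_size lists_to_bin 0 [] [] 0 0

-- ===== PRECONDITION & SPEC =====
def Spec_bin_lists_nearest_neighbor (lists_to_bin : List (List Int)) (best_bin_size : Int) (out : List (List Int)) : Prop := out = bin_lists_nearest_neighbor_alt lists_to_bin best_bin_size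
instance (lists_to_bin : List (List Int)) (best_bin_size : Int) (out : List (List Int)) : Decidable (Spec_bin_lists_nearest_neighbor lists_to_bin best_bin_size out) := by unfold Spec_bin_lists_nearest_neighbor; infer_instance

-- ===== CLAIM (what is proved, stated in full; the proofs are below) =====
def Claim_equal_bin_lists_nearest_neighbor : Prop := ∀ (lists_to_bin : List (List Int)) (best_bin_size : Int), Dom_bin_lists_nearest_neighbor lists_to_bin best_bin_size → Spec_bin_lists_nearest_neighbor lists_to_bin best_bin_size (bin_lists_nearest_neighbor lists_to_bin best_bin_size)

-- ===== LEMMAS AND PROOFS =====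

-- One-step unfolding lemmas for the three loops (definitional).
theorem pvLoopA1_cons (b : Int) (d : List Int) (rest : List (List Int)) (k : Int)
    (l : List Int) (cur prev dlid : Int) :
    pvLoopA1 b (d :: rest) k l cur prev dlid =
      if cur + (d.length : Int) ≥ b then
        if b - prev < cur + (d.length : Int) - b then
          pvLoopA1 b rest (k + 1) (l ++ [k - 1]) (d.length : Int) (d.length : Int) k
        else pvLoopA1 b rest (k + 1) l (cur + (d.length : Int)) (cur + (d.length : Int)) k
      else pvLoopA1 b rest (k + 1) l (cur + (d.length : Int)) (cur + (d.length : Int)) k := rfl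

theorem pvLoopA2_cons (d : List Int) (rest : List (List Int)) (k : Int) (last : List Int)
    (bins : List (List Int)) (cb : List Int) :
    pvLoopA2 (d :: rest) k last bins cb =
      if k ∈ last then pvLoopA2 rest (k + 1) last (bins ++ [cb ++ [k]]) []
      else pvLoopA2 rest (k + 1) last bins (cb ++ [k]) := rfl

theorem pvLoopB_cons (b : Int) (d : List Int) (rest : List (List Int)) (k : Int)
    (bins : List (List Int)) (cb : List Int) (cur prev : Int) :
    pvLoopB b (d :: rest) k bins cb cur prev =
      if cur + (d.length : Int) ≥ b ∧ b - prev < cur + (d.length : Int) - b ∧ cb ≠ [] then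
        pvLoopB b rest (k + 1) (bins ++ [cb]) [k] (d.length : Int) (d.length : Int)
      else pvLoopB b rest (k + 1) bins (cb ++ [k]) (cur + (d.length : Int)) (cur + (d.length : Int)) := rfl

-- pvLoopA1's accumulator is only appended to.
theorem pvLoopA1_acc (b : Int) (xs : List (List Int)) :
    ∀ (k : Int) (l : List Int) (cur prev dlid : Int),
      pvLoopA1 b xs k l cur prev dlid =
        (l ++ (pvLoopA1 b xs k [] cur prev dlid).1, (pvLoopA1 b xs k [] cur prev dlid).2) := by
  induction xs with
  | nil => intro k l cur prev dlid; simp [pvLoopA1]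
  | cons d rest ih =>
    intro k l cur prev dlid
    rw [pvLoopA1_cons, pvLoopA1_cons]
    split_ifs with h1 h2
    · rw [ih (k+1) (l ++ [k-1]), ih (k+1) ([] ++ [k-1])]; simp
    · exact ih _ _ _ _ _
    · exact ih _ _ _ _ _

-- Every boundary produced from index k on is ≥ k - 1, and the returned dlid is
-- the passed-in default or ≥ k.
theorem pvLoopA1_bound (b : Int) (xs : List (List Int)) :
    ∀ (k cur prev dlid : Int),
      (∀ j ∈ (pvLoopA1 b xs k [] cur prev dlid).1, k - 1 ≤ j) ∧
      ((pvLoopA1 b xs k [] cur prev dlid).2 = dlid ∨ k ≤ (pvLoopA1 b xs k [] cur prev dlid).2) := by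
  induction xs with
  | nil => intro k cur prev dlid; simp [pvLoopA1]
  | cons d rest ih =>
    intro k cur prev dlid
    rw [pvLoopA1_cons]
    split_ifs with h1 h2
    · rw [pvLoopA1_acc b rest (k+1) ([] ++ [k-1])]
      obtain ⟨ihm, ihd⟩ := ih (k+1) (d.length : Int) (d.length : Int) k
      constructor
      · intro j hj
        simp only [List.nil_append, List.mem_append, List.mem_singleton] at hj
        rcases hj with h | h
        · omega
        · have := ihm j h; omega
      · rcases ihd with h | h
        · exact Or.inr (by omega)
        · exact Or.inr (by omega)
    · obtain ⟨ihm, ihd⟩ := ih (k+1) (cur + (d.length : Int)) (cur + (d.length : Int)) k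
      refine ⟨fun j hj => by have := ihm j hj; omega, ?_⟩
      rcases ihd with h | h
      · exact Or.inr (by omega)
      · exact Or.inr (by omega)
    · obtain ⟨ihm, ihd⟩ := ih (k+1) (cur + (d.length : Int)) (cur + (d.length : Int)) k
      refine ⟨fun j hj => by have := ihm j hj; omega, ?_⟩
      rcases ihd with h | h
      · exact Or.inr (by omega)
      · exact Or.inr (by omega)

-- pvLoopA2 from index k only consults membership of indices ≥ k.
theorem pvLoopA2_congr (xs : List (List Int)) :
    ∀ (k : Int) (l₁ l₂ : List Int) (bins : List (List Int)) (cb : List Int),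
      (∀ j : Int, k ≤ j → (j ∈ l₁ ↔ j ∈ l₂)) →
      pvLoopA2 xs k l₁ bins cb = pvLoopA2 xs k l₂ bins cb := by
  induction xs with
  | nil => intro k l₁ l₂ bins cb _; simp [pvLoopA2]
  | cons d rest ih =>
    intro k l₁ l₂ bins cb h
    rw [pvLoopA2_cons, pvLoopA2_cons]
    have hm : (k ∈ l₁) ↔ (k ∈ l₂) := h k le_rfl
    by_cases hk : k ∈ l₁
    · rw [if_pos hk, if_pos (hm.mp hk)]
      exact ih (k+1) l₁ l₂ _ _ (fun j hj => h j (by omega))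
    · rw [if_neg hk, if_neg (fun hc => hk (hm.mpr hc))]
      exact ih (k+1) l₁ l₂ _ _ (fun j hj => h j (by omega))

-- Main synchronisation: A's second loop, one index behind (about to process index
-- k-1 with open bin cbA), against B's fused loop about to process index k with
-- open bin cbA ++ [k-1].
theorem pv_main (b : Int) (xs : List (List Int)) :
    ∀ (k cur prev : Int) (bins : List (List Int)) (cbA : List Int) (d : List Int),
      pvLoopA2 (d :: xs) (k - 1)
          ((pvLoopA1 b xs k [] cur prev (k - 1)).1 ++ [(pvLoopA1 b xs k [] cur prev (k - 1)).2])
          bins cbA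
        = pvLoopB b xs k bins (cbA ++ [k - 1]) cur prev := by
  induction xs with
  | nil =>
    intro k cur prev bins cbA d
    simp [pvLoopA1, pvLoopA2, pvLoopB]
  | cons e rest ih =>
    intro k cur prev bins cbA d
    have hk1 : k - 1 + 1 = k := by ring
    have hk2 : k + 1 - 1 = k := by ring
    rw [pvLoopB_cons, pvLoopA1_cons]
    by_cases h1 : cur + (e.length : Int) ≥ b
    · by_cases h2 : b - prev < cur + (e.length : Int) - b
      · -- close branch
        rw [if_pos h1, if_pos h2,
          if_pos (show cur + (e.length : Int) ≥ b ∧ b - prev < cur + (e.length : Int) - b ∧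
            cbA ++ [k-1] ≠ [] from ⟨h1, h2, by simp⟩)]
        rw [pvLoopA1_acc b rest (k+1) ([] ++ [k-1])]
        set F := (pvLoopA1 b rest (k+1) [] (e.length : Int) (e.length : Int) k).1 with hF
        set dl := (pvLoopA1 b rest (k+1) [] (e.length : Int) (e.length : Int) k).2 with hdl
        rw [pvLoopA2_cons]
        rw [if_pos (show (k-1) ∈ ([] ++ [k-1] ++ F) ++ [dl] by simp)]
        have hcongr : pvLoopA2 (e :: rest) (k - 1 + 1) (([] ++ [k-1] ++ F) ++ [dl])
              (bins ++ [cbA ++ [k-1]]) []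
            = pvLoopA2 (e :: rest) (k - 1 + 1) (F ++ [dl]) (bins ++ [cbA ++ [k-1]]) [] := by
          apply pvLoopA2_congr
          intro j hj
          have hjk : j ≠ k - 1 := by omega
          simp [hjk]
        rw [hcongr, hk1]
        have key := ih (k + 1) (e.length : Int) (e.length : Int) (bins ++ [cbA ++ [k-1]]) [] e
        rw [hk2] at key
        simpa using key
      · -- second conjunct of the close condition fails
        rw [if_pos h1, if_neg h2, if_neg (fun hc => h2 hc.2.1)]
        obtain ⟨hbm, hbd⟩ := pvLoopA1_bound b rest (k+1) (cur + (e.length : Int)) (cur + (e.length : Int)) k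
        rw [pvLoopA2_cons]
        rw [if_neg (show (k-1) ∉ (pvLoopA1 b rest (k+1) [] (cur + (e.length : Int)) (cur + (e.length : Int)) k).1
            ++ [(pvLoopA1 b rest (k+1) [] (cur + (e.length : Int)) (cur + (e.length : Int)) k).2] by
          intro hc
          rcases List.mem_append.mp hc with h | h
          · have := hbm _ h; omega
          · have := List.mem_singleton.mp h
            rcases hbd with h' | h' <;> omega)]
        rw [hk1]
        have key := ih (k + 1) (cur + (e.length : Int)) (cur + (e.length : Int)) bins (cbA ++ [k-1]) e
        rw [hk2] at key
        simpa [List.append_assoc] using key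
    · -- first conjunct of the close condition fails
      rw [if_neg h1, if_neg (fun hc => h1 hc.1)]
      obtain ⟨hbm, hbd⟩ := pvLoopA1_bound b rest (k+1) (cur + (e.length : Int)) (cur + (e.length : Int)) k
      rw [pvLoopA2_cons]
      rw [if_neg (show (k-1) ∉ (pvLoopA1 b rest (k+1) [] (cur + (e.length : Int)) (cur + (e.length : Int)) k).1
          ++ [(pvLoopA1 b rest (k+1) [] (cur + (e.length : Int)) (cur + (e.length : Int)) k).2] by
        intro hc
        rcases List.mem_append.mp hc with h | h
        · have := hbm _ h; omega
        · have := List.mem_singleton.mp h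
          rcases hbd with h' | h' <;> omega)]
      rw [hk1]
      have key := ih (k + 1) (cur + (e.length : Int)) (cur + (e.length : Int)) bins (cbA ++ [k-1]) e
      rw [hk2] at key
      simpa [List.append_assoc] using key

-- ===== VERDICT (by name: the statement is the Claim_ definition above) =====
theorem bin_lists_nearest_neighbor_spec : Claim_equal_bin_lists_nearest_neighbor := by
  intro xs b _
  unfold Spec_bin_lists_nearest_neighbor bin_lists_nearest_neighbor bin_lists_nearest_neighbor_alt
  cases xs with
  | nil => simp [pvLoopA2, pvLoopB]
  | cons d rest =>
    have key := pv_main b rest 1 (d.length : Int) (d.length : Int) [] [] d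
    have h01 : (1 : Int) - 1 = 0 := by norm_num
    rw [h01] at key
    rw [pvLoopB_cons, if_neg (fun hc => hc.2.2 rfl), pvLoopA1_cons]
    simp only [zero_add, List.nil_append]
    split_ifs with h1 h2
    · rw [pvLoopA1_acc b rest 1 ([0 - 1])]
      set F := (pvLoopA1 b rest 1 [] (d.length : Int) (d.length : Int) 0).1 with hF
      set dl := (pvLoopA1 b rest 1 [] (d.length : Int) (d.length : Int) 0).2 with hdl
      have hcongr : pvLoopA2 (d :: rest) 0 (([0-1] ++ F) ++ [dl]) [] []
          = pvLoopA2 (d :: rest) 0 (F ++ [dl]) [] [] := by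
        apply pvLoopA2_congr
        intro j hj
        have hne : j ≠ (-1 : Int) := by omega
        simp [hne]
      rw [hcongr]
      simpa using key
    · simpa using key
    · simpa using key
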